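-- pv_equiv track=rewrite | github.com/simdenis/jalapeno-poppers-bot | dining_checker.py | _contains_sequence
-- ===== SOURCE A (Python) =====
-- def _contains_sequence(tokens: list[str], phrase_tokens: list[str]) -> bool:
--     if not phrase_tokens:
--         return False
--     if len(phrase_tokens) > len(tokens):
--         return False
--     for i in range(len(tokens) - len(phrase_tokens) + 1):
--         if tokens[i : i + len(phrase_tokens)] == phrase_tokens:
--             return True
--     return False
-- ===== SOURCE B (Python) =====
-- def _contains_sequence(tokens: list[str], phrase_tokens: list[str]) -> bool:
--     # One left-to-right pass simulating the NFA of partial matches (alternative algorithm):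
--     # `states` holds the lengths of all prefixes of phrase_tokens that are
--     # suffixes of the tokens read so far.  No slices are built or compared.
--     if not phrase_tokens:
--         return False
--     m = len(phrase_tokens)
--     states = [0]
--     for tok in tokens:
--         nxt = [0]
--         for q in states:
--             if phrase_tokens[q] == tok:
--                 if q + 1 == m:
--                     return True
--                 nxt.append(q + 1)
--         states = nxt
--     return False
-- ===== Notes on version B (the rewrite author's own statement) =====
-- stated objective: alternative
-- what changed: Replaces the slice-per-position scan (build tokens[i:i+m] and compare it for every i) with a single left-to-right pass that maintains the list of active partial-match lengths (NFA simulation), so no slices are built or compared.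
import Mathlib
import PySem

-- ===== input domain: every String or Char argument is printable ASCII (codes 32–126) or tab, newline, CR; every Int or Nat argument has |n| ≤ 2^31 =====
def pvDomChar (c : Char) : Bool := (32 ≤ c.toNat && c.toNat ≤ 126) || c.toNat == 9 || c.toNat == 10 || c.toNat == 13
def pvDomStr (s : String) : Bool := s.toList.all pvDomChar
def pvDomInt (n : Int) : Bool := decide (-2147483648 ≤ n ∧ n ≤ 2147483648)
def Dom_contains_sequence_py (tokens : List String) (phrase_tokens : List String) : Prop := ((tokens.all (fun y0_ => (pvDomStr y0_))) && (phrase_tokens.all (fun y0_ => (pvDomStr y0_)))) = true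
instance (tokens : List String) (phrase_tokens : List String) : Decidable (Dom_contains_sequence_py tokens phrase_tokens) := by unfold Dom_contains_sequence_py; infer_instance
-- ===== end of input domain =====

-- B replaces A's slice-per-position scan by a single left-to-right pass that maintains
-- the list of active partial-match lengths (NFA simulation); objective: alternative
-- algorithm of the same worst-case cost (no slice is built or compared).

-- ===== PORT A =====
-- literal transliteration of A: two guard branches, then a for-loop over
-- range(len(tokens) - len(phrase_tokens) + 1) comparing the slice tokens[i:i+m]
-- with phrase_tokens (early return True on the first hit).
def contains_sequence_py (tokens : List String) (phrase_tokens : List String) : Bool :=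
  if phrase_tokens.isEmpty then false
  else if PySem.List.len phrase_tokens > PySem.List.len tokens then false
  else
    (PySem.List.pyRange 0 (PySem.List.len tokens - PySem.List.len phrase_tokens + 1) 1).any
      (fun i => PySem.List.slice tokens (some i) (some (i + PySem.List.len phrase_tokens)) == phrase_tokens)

-- ===== PORT B =====
-- inner for-loop of Source B: walk the active states `qs`, extending matches into `nxt`
-- (starting from [0]); `none` models Source B's early `return True` when a full match ends here.
def altInner (phrase : List String) (m : Nat) (tok : String) : List Nat → List Nat → Option (List Nat)
  | [], nxt => some nxt
  | q :: qs, nxt =>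
    if phrase.getD q "" == tok then
      if q + 1 == m then none
      else altInner phrase m tok qs (nxt ++ [q + 1])
    else altInner phrase m tok qs nxt

-- outer for-loop of Source B over the tokens, threading the state list
def altLoop (phrase : List String) (m : Nat) : List String → List Nat → Bool
  | [], _ => false
  | tok :: rest, states =>
    match altInner phrase m tok states [0] with
    | none => true
    | some nxt => altLoop phrase m rest nxt

def contains_sequence_py_alt (tokens : List String) (phrase_tokens : List String) : Bool :=
  if phrase_tokens.isEmpty then false
  else altLoop phrase_tokens phrase_tokens.length tokens [0]

-- ===== PRECONDITION & SPEC =====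
def Spec_contains_sequence_py (tokens : List String) (phrase_tokens : List String) (out : Bool) : Prop := out = contains_sequence_py_alt tokens phrase_tokens
instance (tokens : List String) (phrase_tokens : List String) (out : Bool) : Decidable (Spec_contains_sequence_py tokens phrase_tokens out) := by unfold Spec_contains_sequence_py; infer_instance

-- ===== CLAIM (what is proved, stated in full; the proofs are below) =====
def Claim_equal_contains_sequence_py : Prop := ∀ (tokens : List String) (phrase_tokens : List String), Dom_contains_sequence_py tokens phrase_tokens → Spec_contains_sequence_py tokens phrase_tokens (contains_sequence_py tokens phrase_tokens)

-- ===== LEMMAS AND PROOFS =====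

-- appending the same last element preserves the suffix relation
theorem pv_suffix_concat {α : Type} {l₁ l₂ : List α} (a : α) (h : l₁ <:+ l₂) :
    l₁ ++ [a] <:+ l₂ ++ [a] := by
  obtain ⟨t, ht⟩ := h
  exact ⟨t, by rw [← ht, List.append_assoc]⟩

-- and conversely, suffix between two concats decomposes
theorem pv_concat_suffix_concat {α : Type} {l₁ l₂ : List α} {a b : α} :
    l₁ ++ [a] <:+ l₂ ++ [b] ↔ a = b ∧ l₁ <:+ l₂ := by
  constructor
  · intro h
    rw [← List.reverse_prefix] at h
    simp only [List.reverse_append, List.reverse_cons, List.reverse_nil, List.nil_append,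
      List.cons_append] at h
    rw [List.cons_prefix_cons] at h
    exact ⟨h.1, by rw [← List.reverse_prefix]; exact h.2⟩
  · rintro ⟨rfl, h⟩
    exact pv_suffix_concat a h

theorem pv_take_succ_getD (phrase : List String) (q : Nat) (hq : q < phrase.length) :
    phrase.take (q + 1) = phrase.take q ++ [phrase.getD q ""] := by
  rw [List.take_add_one]
  congr 1
  simp [List.getD, List.getElem?_eq_getElem hq]

-- altInner returns none exactly when some active state completes the phrase on this token
theorem pv_inner_none_iff (phrase : List String) (m : Nat) (tok : String) :
    ∀ (states nxt : List Nat),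
      (altInner phrase m tok states nxt = none ↔
        ∃ q ∈ states, phrase.getD q "" = tok ∧ q + 1 = m) := by
  intro states
  induction states with
  | nil => intro nxt; simp [altInner]
  | cons q qs ih =>
    intro nxt
    simp only [altInner]
    split_ifs with h1 h2
    · simp only [beq_iff_eq] at h1 h2
      exact iff_of_true rfl ⟨q, List.mem_cons_self .., h1, h2⟩
    · simp only [beq_iff_eq] at h1 h2
      rw [ih]
      constructor
      · rintro ⟨q', hq', h⟩; exact ⟨q', by simp [hq'], h⟩
      · rintro ⟨q', hq', h⟩
        rcases List.mem_cons.mp hq' with rfl | hmem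
        · exact absurd h.2 h2
        · exact ⟨q', hmem, h⟩
    · simp only [beq_iff_eq] at h1
      rw [ih]
      constructor
      · rintro ⟨q', hq', h⟩; exact ⟨q', by simp [hq'], h⟩
      · rintro ⟨q', hq', h⟩
        rcases List.mem_cons.mp hq' with rfl | hmem
        · exact absurd h.1 h1
        · exact ⟨q', hmem, h⟩

-- membership in the state list altInner builds
theorem pv_inner_some_mem (phrase : List String) (m : Nat) (tok : String) :
    ∀ (states nxt S' : List Nat),
      altInner phrase m tok states nxt = some S' →
      ∀ x, (x ∈ S' ↔ x ∈ nxt ∨ ∃ q ∈ states, phrase.getD q "" = tok ∧ q + 1 ≠ m ∧ x = q + 1) := by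
  intro states
  induction states with
  | nil =>
    intro nxt S' h x
    simp only [altInner, Option.some.injEq] at h
    simp [← h]
  | cons q qs ih =>
    intro nxt S' h x
    simp only [altInner] at h
    split_ifs at h with h1 h2
    · rw [ih _ _ h x]
      simp only [beq_iff_eq] at h1 h2
      constructor
      · rintro (hx | ⟨q', hq', hh⟩)
        · rcases List.mem_append.mp hx with hx | hx
          · exact Or.inl hx
          · simp only [List.mem_singleton] at hx
            exact Or.inr ⟨q, List.mem_cons_self .., ⟨h1, h2, hx⟩⟩
        · exact Or.inr ⟨q', List.mem_cons_of_mem _ hq', hh⟩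
      · rintro (hx | ⟨q', hq', hh⟩)
        · exact Or.inl (List.mem_append.mpr (Or.inl hx))
        · rcases List.mem_cons.mp hq' with rfl | hmem
          · exact Or.inl (List.mem_append.mpr (Or.inr (by simp [hh.2.2])))
          · exact Or.inr ⟨q', hmem, hh⟩
    · rw [ih _ _ h x]
      simp only [beq_iff_eq] at h1
      constructor
      · rintro (hx | ⟨q', hq', hh⟩)
        · exact Or.inl hx
        · exact Or.inr ⟨q', List.mem_cons_of_mem _ hq', hh⟩
      · rintro (hx | ⟨q', hq', hh⟩)
        · exact Or.inl hx
        · rcases List.mem_cons.mp hq' with rfl | hmem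
          · exact absurd hh.1 h1
          · exact Or.inr ⟨q', hmem, hh⟩

-- main loop invariant: with states = the lengths of all phrase-prefixes that are suffixes
-- of the consumed input `pre`, the loop finds exactly the occurrences ending in `rest`
theorem pv_loop_iff (phrase : List String) (hph : phrase ≠ []) :
    ∀ (rest pre : List String) (S : List Nat),
      (∀ q, q ∈ S ↔ q < phrase.length ∧ phrase.take q <:+ pre) →
      (altLoop phrase phrase.length rest S = true ↔
        ∃ k, 1 ≤ k ∧ k ≤ rest.length ∧ phrase <:+ pre ++ rest.take k) := by
  intro rest
  induction rest with
  | nil =>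
    intro pre S hS
    simp only [altLoop, List.length_nil]
    constructor
    · intro h; cases h
    · rintro ⟨k, hk1, hk2, _⟩; omega
  | cons tok rest' ih =>
    intro pre S hS
    simp only [altLoop]
    cases h : altInner phrase phrase.length tok S [0] with
    | none =>
      simp only [true_iff]
      obtain ⟨q, hqS, htok, hqm⟩ := (pv_inner_none_iff phrase phrase.length tok S [0]).mp h
      obtain ⟨hqlt, hsuf⟩ := (hS q).mp hqS
      refine ⟨1, le_refl 1, by simp, ?_⟩
      have hphr : phrase = phrase.take q ++ [phrase.getD q ""] := by
        conv_lhs => rw [← List.take_length (l := phrase), ← hqm, pv_take_succ_getD phrase q hqlt]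
      rw [hphr, htok]
      simpa using pv_suffix_concat tok hsuf
    | some S' =>
      have hInv : ∀ q, q ∈ S' ↔ q < phrase.length ∧ phrase.take q <:+ pre ++ [tok] := by
        intro x
        rw [pv_inner_some_mem phrase phrase.length tok S [0] S' h x]
        constructor
        · rintro (hx | ⟨q, hqS, htok, hqm, rfl⟩)
          · simp only [List.mem_singleton] at hx
            subst hx
            exact ⟨List.length_pos_of_ne_nil hph, by simp⟩
          · obtain ⟨hqlt, hsuf⟩ := (hS q).mp hqS
            refine ⟨by omega, ?_⟩
            rw [pv_take_succ_getD phrase q hqlt, htok]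
            exact pv_suffix_concat tok hsuf
        · rintro ⟨hxlt, hsuf⟩
          cases x with
          | zero => exact Or.inl (by simp)
          | succ q =>
            have hqlt : q < phrase.length := by omega
            rw [pv_take_succ_getD phrase q hqlt] at hsuf
            obtain ⟨htok, hsuf'⟩ := pv_concat_suffix_concat.mp hsuf
            exact Or.inr ⟨q, (hS q).mpr ⟨hqlt, hsuf'⟩, htok, by omega, rfl⟩
      rw [ih (pre ++ [tok]) S' hInv]
      have hnot1 : ¬ (phrase <:+ pre ++ [tok]) := by
        intro hsuf
        have hm : 0 < phrase.length := List.length_pos_of_ne_nil hph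
        have hq : phrase.length - 1 < phrase.length := by omega
        have hphr : phrase = phrase.take (phrase.length - 1) ++ [phrase.getD (phrase.length - 1) ""] := by
          conv_lhs => rw [← List.take_length (l := phrase)]
          rw [show phrase.length = (phrase.length - 1) + 1 by omega] at hq ⊢
          exact pv_take_succ_getD phrase _ (by omega)
        rw [hphr] at hsuf
        obtain ⟨htok, hsuf'⟩ := pv_concat_suffix_concat.mp hsuf
        have : altInner phrase phrase.length tok S [0] = none :=
          (pv_inner_none_iff phrase phrase.length tok S [0]).mpr
            ⟨phrase.length - 1, (hS _).mpr ⟨hq, hsuf'⟩, htok, by omega⟩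
        rw [this] at h; cases h
      constructor
      · rintro ⟨k', hk1, hk2, hsuf⟩
        refine ⟨k' + 1, by omega, by simp; omega, ?_⟩
        simpa [List.append_assoc] using hsuf
      · rintro ⟨k, hk1, hk2, hsuf⟩
        match k, hk1 with
        | 1, _ =>
          exact absurd (by simpa using hsuf) hnot1
        | (k' + 2), _ =>
          refine ⟨k' + 1, by omega, by simp at hk2 ⊢; omega, ?_⟩
          simpa [List.append_assoc] using hsuf

-- B's result characterised
theorem pv_alt_iff (tokens phrase : List String) (hph : phrase ≠ []) :
    contains_sequence_py_alt tokens phrase = true ↔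
      ∃ k, 1 ≤ k ∧ k ≤ tokens.length ∧ phrase <:+ tokens.take k := by
  have h0 : ∀ q, q ∈ ([0] : List Nat) ↔ q < phrase.length ∧ phrase.take q <:+ ([] : List String) := by
    intro q
    simp only [List.mem_singleton, List.suffix_nil]
    constructor
    · rintro rfl
      exact ⟨List.length_pos_of_ne_nil hph, by simp⟩
    · rintro ⟨hlt, htake⟩
      rcases List.take_eq_nil_iff.mp htake with h | h
      · exact h
      · exact absurd h hph
  have := pv_loop_iff phrase hph tokens [] [0] h0
  simp only [List.nil_append] at this
  simp only [contains_sequence_py_alt, List.isEmpty_iff, if_neg hph]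
  exact this

-- A's result characterised
theorem pv_a_iff (tokens phrase : List String) (hph : phrase ≠ []) :
    contains_sequence_py tokens phrase = true ↔
      ∃ i : Nat, i + phrase.length ≤ tokens.length ∧ (tokens.drop i).take phrase.length = phrase := by
  simp only [contains_sequence_py, List.isEmpty_iff, if_neg hph, PySem.List.len_eq]
  by_cases hmn : (phrase.length : Int) > (tokens.length : Int)
  · rw [if_pos hmn]
    refine iff_of_false (by simp) ?_
    rintro ⟨i, hle, -⟩
    omega
  · rw [if_neg hmn]
    rw [List.any_eq_true]
    constructor
    · rintro ⟨i, hi, hEq⟩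
      rw [PySem.List.mem_pyRange_one] at hi
      obtain ⟨hi0, hiu⟩ := hi
      rw [beq_iff_eq] at hEq
      refine ⟨i.toNat, by omega, ?_⟩
      have : PySem.List.slice tokens (some ((i.toNat : Nat) : Int))
          (some (((i.toNat : Nat) : Int) + ((phrase.length : Nat) : Int))) = phrase := by
        rw [Int.toNat_of_nonneg hi0]; exact_mod_cast hEq
      rwa [PySem.List.slice_natCast_add] at this
    · rintro ⟨i, hle, hEq⟩
      refine ⟨(i : Int), ?_, ?_⟩
      · rw [PySem.List.mem_pyRange_one]; omega
      · rw [beq_iff_eq]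
        have := PySem.List.slice_natCast_add (xs := tokens) (j := i) (n := phrase.length)
        rw [this]
        exact_mod_cast hEq
-- bridge between A's occurrence form and B's suffix-of-prefix form
theorem pv_occ_bridge (tokens phrase : List String) (hph : phrase ≠ []) :
    (∃ i : Nat, i + phrase.length ≤ tokens.length ∧ (tokens.drop i).take phrase.length = phrase) ↔
      ∃ k, 1 ≤ k ∧ k ≤ tokens.length ∧ phrase <:+ tokens.take k := by
  have hm : 0 < phrase.length := List.length_pos_of_ne_nil hph
  constructor
  · rintro ⟨i, hle, hEq⟩
    refine ⟨i + phrase.length, by omega, hle, ?_⟩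
    rw [List.take_add]
    exact ⟨tokens.take i, by rw [hEq]⟩
  · rintro ⟨k, hk1, hk2, t, ht⟩
    refine ⟨t.length, ?_, ?_⟩
    · have := congrArg List.length ht
      simp only [List.length_append, List.length_take] at this
      omega
    · have hdrop : (tokens.take k).drop t.length = phrase := by
        rw [← ht, List.drop_left]
      rw [List.drop_take] at hdrop
      have hlen : phrase.length ≤ k - t.length := by
        have := congrArg List.length hdrop
        simp only [List.length_take, List.length_drop] at this
        omega
      calc (tokens.drop t.length).take phrase.length
          = (((tokens.drop t.length).take (k - t.length)).take phrase.length) := by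
            rw [List.take_take, min_eq_left hlen]
        _ = phrase.take phrase.length := by rw [hdrop]
        _ = phrase := List.take_length ..

-- ===== VERDICT (by name: the statement is the Claim_ definition above) =====
theorem contains_sequence_py_spec : Claim_equal_contains_sequence_py := by
  intro tokens phrase _
  unfold Spec_contains_sequence_py
  by_cases hph : phrase = []
  · subst hph
    rfl
  · rw [Bool.eq_iff_iff, pv_a_iff tokens phrase hph, pv_alt_iff tokens phrase hph]
    exact pv_occ_bridge tokens phrase hph
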